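-- pv_equiv track=rewrite | github.com/DilermandoQueiroz/Cowboy | algebrageo.py | analisesoma
-- ===== SOURCE A (Python) =====
-- def analisesoma(mult):
--     for c in range(0, len(mult)):
--         for k in range(c+1, len(mult)):
--             if (mult[k][1] == mult[c][1]):
--                 mult[c][0] = mult[c][0]+mult[k][0]
--                 mult[k][0] = 0
--
--     multr=list()
--
--     for c in range(0, len(mult)):
--         if (mult[c][0] != 0):
--             multr.append([mult[c][0], mult[c][1]])
--
--     multr.sort(key=sortSecond)
--
--     return multr
--
-- def sortSecond(val):
--     return val[1]
-- ===== SOURCE B (Python) =====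
-- def analisesoma(mult):
--     totals = {}
--     for term in mult:
--         totals[term[1]] = totals.get(term[1], 0) + term[0]
--     return sorted(([v, k] for k, v in totals.items() if v != 0),
--                   key=lambda t: t[1])
-- ===== Notes on version B (the rewrite author's own statement) =====
-- stated objective: alternative
-- what changed: Replaces the O(n^2) pairwise in-place merging of equal-exponent terms by a single-pass dict grouping keyed on the exponent, then filters zero sums and sorts (intended as faster in the number of terms; a timing run read 1.75x at the largest size but inconsistently, so no speed is claimed); B also no longer mutates the input list. Pre_ excludes inputs containing an inner list of fewer than 2 elements: on these A raises IndexError, except for the degenerate single-term list [[0]] where A happens to return [] before ever indexing the exponent.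
-- outside the precondition, e.g. on analisesoma([[0]]): A returns [], B raises IndexError
import Mathlib
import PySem

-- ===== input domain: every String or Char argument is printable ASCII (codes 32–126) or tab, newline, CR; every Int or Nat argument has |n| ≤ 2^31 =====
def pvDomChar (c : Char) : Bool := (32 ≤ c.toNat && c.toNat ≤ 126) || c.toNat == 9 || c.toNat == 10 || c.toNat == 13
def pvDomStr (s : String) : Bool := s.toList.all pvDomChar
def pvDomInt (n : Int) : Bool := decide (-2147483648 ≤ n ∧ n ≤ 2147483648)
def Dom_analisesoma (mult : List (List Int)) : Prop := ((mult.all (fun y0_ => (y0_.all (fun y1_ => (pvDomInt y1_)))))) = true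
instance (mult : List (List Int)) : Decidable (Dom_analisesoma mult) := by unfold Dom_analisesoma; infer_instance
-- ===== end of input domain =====

-- B replaces A's in-place pairwise merging of equal-exponent terms by a one-pass
-- dict grouping on the exponent, then filters zero sums and sorts (objective: alternative).
-- A mutates its argument in place (Python side); the equivalence proved here is about the
-- return value only — B does not mutate the input.

-- ===== PORT A =====
-- inner loop body: 'if mult[k][1] == mult[c][1]: mult[c][0] += mult[k][0]; mult[k][0] = 0'
def innerStep (c : Int) (mult : List (List Int)) (k : Int) : List (List Int) :=
  if PySem.List.pyGetD (PySem.List.pyGetD mult k []) 1 0 == PySem.List.pyGetD (PySem.List.pyGetD mult c []) 1 0 then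
    let mult' := PySem.List.pySetD mult c
      (PySem.List.pySetD (PySem.List.pyGetD mult c []) 0
        (PySem.List.pyGetD (PySem.List.pyGetD mult c []) 0 0 + PySem.List.pyGetD (PySem.List.pyGetD mult k []) 0 0))
    PySem.List.pySetD mult' k (PySem.List.pySetD (PySem.List.pyGetD mult' k []) 0 0)
  else mult

-- 'for k in range(c+1, len(mult)): …'
def outerStep (mult : List (List Int)) (c : Int) : List (List Int) :=
  (PySem.List.pyRange (c + 1) (mult.length : Int) 1).foldl (fun m k => innerStep c m k) mult

def analisesoma (mult : List (List Int)) : List (List Int) :=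
  let mult1 := (PySem.List.pyRange 0 (mult.length : Int) 1).foldl outerStep mult
  let multr := (PySem.List.pyRange 0 (mult1.length : Int) 1).foldl (fun multr c =>
    if PySem.List.pyGetD (PySem.List.pyGetD mult1 c []) 0 0 ≠ 0 then
      multr ++ [[PySem.List.pyGetD (PySem.List.pyGetD mult1 c []) 0 0,
                 PySem.List.pyGetD (PySem.List.pyGetD mult1 c []) 1 0]]
    else multr) []
  PySem.List.sorted multr (fun val => PySem.List.pyGetD val 1 0) false

-- ===== PORT B =====
def analisesoma_alt (mult : List (List Int)) : List (List Int) :=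
  let totals := mult.foldl (fun totals term =>
    totals.insert (PySem.List.pyGetD term 1 0)
      (totals.getD (PySem.List.pyGetD term 1 0) 0 + PySem.List.pyGetD term 0 0))
    PySem.Dict.empty
  PySem.List.sorted ((totals.items.filter (fun p => p.2 != 0)).map (fun p => [p.2, p.1]))
    (fun t => PySem.List.pyGetD t 1 0) false

-- ===== PRECONDITION & SPEC =====
-- Pre_ excludes the inputs with an inner list of fewer than 2 elements: on these Python A
-- raises IndexError (mult[c][1] / mult[k][1] / mult[c][0] out of range), except for the
-- degenerate input [[0]] where A returns [] before ever indexing the exponent (see cites).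
def Pre_analisesoma (mult : List (List Int)) : Prop := ∀ t ∈ mult, 2 ≤ t.length
instance (mult : List (List Int)) : Decidable (Pre_analisesoma mult) := by unfold Pre_analisesoma; infer_instance

def pvWitness_analisesoma : List (List Int) := [[1, 2], [3, 2], [0, 5], [-1, 0]]

def Spec_analisesoma (mult : List (List Int)) (out : List (List Int)) : Prop := out = analisesoma_alt mult
instance (mult : List (List Int)) (out : List (List Int)) : Decidable (Spec_analisesoma mult out) := by unfold Spec_analisesoma; infer_instance

-- ===== CLAIM (what is proved, stated in full; the proofs are below) =====
def Claim_equal_analisesoma : Prop := ∀ (mult : List (List Int)), Dom_analisesoma mult → Pre_analisesoma mult → Spec_analisesoma mult (analisesoma mult)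

-- ===== LEMMAS AND PROOFS =====

-- the coefficient and the exponent of a term (indices 0 and 1, with Python's getD-default 0)
def coefT (t : List Int) : Int := t.getD 0 0
def keyT (t : List Int) : Int := t.getD 1 0

-- zero out the coefficient of every term whose exponent is x
def zeroK (x : Int) (r : List (List Int)) : List (List Int) :=
  r.map (fun u => if keyT u == x then u.set 0 0 else u)

-- remove every term whose exponent is x
def remK (x : Int) (r : List (List Int)) : List (List Int) :=
  r.filter (fun u => keyT u != x)

-- total coefficient of exponent x in r
def sumK (x : Int) (r : List (List Int)) : Int :=
  ((r.filter (fun u => keyT u == x)).map coefT).sum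

-- structural description of A's double loop
def comb (mult : List (List Int)) : List (List Int) :=
  match mult with
  | [] => []
  | t :: r => t.set 0 (coefT t + sumK (keyT t) r) :: comb (zeroK (keyT t) r)
termination_by mult.length
decreasing_by simp [zeroK]

-- the combined nonzero terms, first-occurrence order (common normal form of A and B)
def resF (mult : List (List Int)) : List (List Int) :=
  match mult with
  | [] => []
  | t :: r =>
    (if coefT t + sumK (keyT t) r ≠ 0 then [[coefT t + sumK (keyT t) r, keyT t]] else [])
      ++ resF (remK (keyT t) r)
termination_by mult.length
decreasing_by exact Nat.lt_succ_of_le (List.length_filter_le _ _)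

-- ordered first occurrences (structural form of PySem.List.dedup)
def ded (xs : List Int) : List Int :=
  match xs with
  | [] => []
  | x :: r => x :: ded (r.filter (fun y => y != x))
termination_by xs.length
decreasing_by simpa using Nat.lt_succ_of_le (List.length_filter_le _ _)


theorem keyT_set0 (t : List Int) (v : Int) : keyT (t.set 0 v) = keyT t := by
  cases t <;> simp [keyT]

theorem coefT_set0_zero (t : List Int) : coefT (t.set 0 0) = 0 := by
  cases t <;> simp [coefT]

theorem set0_coefT_self (t : List Int) : t.set 0 (coefT t) = t := by
  cases t <;> simp [coefT]

theorem sumK_nil (x : Int) : sumK x [] = 0 := rfl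

theorem sumK_cons (x : Int) (u : List Int) (r : List (List Int)) :
    sumK x (u :: r) = if keyT u == x then coefT u + sumK x r else sumK x r := by
  by_cases h : keyT u == x <;> simp [sumK, h]

-- the inner loop 'for k in range(c+1, len(mult))' at c = 0, having already examined 'done'
theorem set_set_coef (t : List Int) (a S : Int) :
    (t.set 0 a).set 0 (coefT (t.set 0 a) + S) = t.set 0 (a + S) := by
  cases t <;> simp [coefT]

theorem innerStep_at (done todo : List (List Int)) (t u : List Int) :
    innerStep 0 (t :: done ++ u :: todo) ((done.length + 1 : Nat) : Int)
      = if keyT u == keyT t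
        then t.set 0 (coefT t + coefT u) :: done ++ (u.set 0 0) :: todo
        else t :: done ++ u :: todo := by
  unfold innerStep
  simp only [PySem.List.pyGetD_natCast, PySem.List.pySetD_natCast]
  simp [PySem.List.pyGetD_ofNat', PySem.List.pySetD_of_nonneg, keyT, coefT]

theorem L_inner (todo done : List (List Int)) (t : List Int) :
    (PySem.List.pyRange ((done.length + 1 : Nat) : Int) ((done.length + 1 + todo.length : Nat) : Int) 1).foldl
        (fun m k => innerStep 0 m k) (t :: done ++ todo)
      = t.set 0 (coefT t + sumK (keyT t) todo) :: done ++ zeroK (keyT t) todo := by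
  induction todo generalizing done t with
  | nil =>
    rw [PySem.List.pyRange_one_eq_nil (by simp)]
    simp [sumK_nil, zeroK, set0_coefT_self]
  | cons u todo ih =>
    rw [PySem.List.pyRange_one_cons (by simp only [List.length_cons]; push_cast; omega)]
    rw [List.foldl_cons, innerStep_at]
    by_cases h : keyT u = keyT t
    · rw [if_pos (by simp [h])]
      have h1 : ((done.length + 1 : Nat) : Int) + 1 = (((done ++ [u.set 0 0]).length + 1 : Nat) : Int) := by
        simp only [List.length_append, List.length_cons, List.length_nil]; push_cast; omega
      have h2 : ((done.length + 1 + (u :: todo).length : Nat) : Int)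
          = (((done ++ [u.set 0 0]).length + 1 + todo.length : Nat) : Int) := by
        simp only [List.length_append, List.length_cons, List.length_nil]; push_cast; omega
      rw [h1, h2]
      have := ih (done ++ [u.set 0 0]) (t.set 0 (coefT t + coefT u))
      rw [show t.set 0 (coefT t + coefT u) :: done ++ u.set 0 0 :: todo
            = t.set 0 (coefT t + coefT u) :: (done ++ [u.set 0 0]) ++ todo by simp]
      rw [this, set_set_coef, keyT_set0, sumK_cons, if_pos (by simp [h])]
      simp [zeroK, h, add_assoc]
    · rw [if_neg (by simp [h])]
      have h1 : ((done.length + 1 : Nat) : Int) + 1 = (((done ++ [u]).length + 1 : Nat) : Int) := by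
        simp only [List.length_append, List.length_cons, List.length_nil]; push_cast; omega
      have h2 : ((done.length + 1 + (u :: todo).length : Nat) : Int)
          = (((done ++ [u]).length + 1 + todo.length : Nat) : Int) := by
        simp only [List.length_append, List.length_cons, List.length_nil]; push_cast; omega
      rw [h1, h2]
      rw [show t :: done ++ u :: todo = t :: (done ++ [u]) ++ todo by simp]
      rw [ih (done ++ [u]) t, sumK_cons, if_neg (by simp [h])]
      simp [zeroK, h]


theorem L_shiftInner (c k : Nat) (h : List Int) (r : List (List Int)) :
    innerStep ((c + 1 : Nat) : Int) (h :: r) ((k + 1 : Nat) : Int)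
      = h :: innerStep (c : Int) r (k : Int) := by
  unfold innerStep
  simp only [PySem.List.pyGetD_natCast, PySem.List.pySetD_natCast, List.getD_cons_succ,
    List.set_cons_succ]
  split <;> rfl

theorem L_foldShift (N a c : Nat) (h : List Int) (r : List (List Int)) :
    (List.range N).foldl (fun m i => innerStep ((c + 1 : Nat) : Int) m ((a + i + 1 : Nat) : Int)) (h :: r)
      = h :: (List.range N).foldl (fun m i => innerStep (c : Int) m ((a + i : Nat) : Int)) r := by
  induction N with
  | zero => simp
  | succ n ih =>
    rw [List.range_succ]
    simp only [List.foldl_append, List.foldl_cons, List.foldl_nil, ih, L_shiftInner]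

theorem L_shiftOuter (c : Nat) (h : List Int) (r : List (List Int)) :
    outerStep (h :: r) ((c + 1 : Nat) : Int) = h :: outerStep r (c : Int) := by
  unfold outerStep
  rw [PySem.List.pyRange_one, PySem.List.pyRange_one, List.foldl_map, List.foldl_map]
  have hN : ((r.length : Int) - ((c : Int) + 1)).toNat
      = (((h :: r).length : Int) - (((c + 1 : Nat) : Int) + 1)).toNat := by
    simp only [List.length_cons]; push_cast; omega
  rw [← hN]
  have e1 : ∀ (i : Nat), (((c + 1 : Nat) : Int) + 1 + (i : Int)) = ((c + 1 + i + 1 : Nat) : Int) := by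
    intro i; push_cast; ring
  have e2 : ∀ (i : Nat), ((c : Int) + 1 + (i : Int)) = ((c + 1 + i : Nat) : Int) := by
    intro i; push_cast; ring
  simp only [e1, e2]
  exact L_foldShift _ (c + 1) c h r

theorem L_outerFold (N : Nat) (h : List Int) (r : List (List Int)) :
    (List.range N).foldl (fun m i => outerStep m ((i + 1 : Nat) : Int)) (h :: r)
      = h :: (List.range N).foldl (fun m i => outerStep m ((i : Nat) : Int)) r := by
  induction N with
  | zero => simp
  | succ n ih =>
    rw [List.range_succ]
    simp only [List.foldl_append, List.foldl_cons, List.foldl_nil, ih, L_shiftOuter]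

-- A's stage 1: the whole double loop
def stage1 (mult : List (List Int)) : List (List Int) :=
  (PySem.List.pyRange 0 (mult.length : Int) 1).foldl outerStep mult

theorem length_zeroK (x : Int) (r : List (List Int)) : (zeroK x r).length = r.length := by
  simp [zeroK]

theorem L_comb (n : Nat) : ∀ mult : List (List Int), mult.length = n → stage1 mult = comb mult := by
  induction n using Nat.strong_induction_on with
  | _ n ih =>
    intro mult hm
    match mult with
    | [] => simp [stage1, comb, PySem.List.pyRange_one_eq_nil]
    | t :: r =>
      unfold stage1
      rw [PySem.List.pyRange_one_cons (by simp only [List.length_cons]; push_cast; omega)]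
      rw [List.foldl_cons]
      have hout : outerStep (t :: r) 0 = t.set 0 (coefT t + sumK (keyT t) r) :: zeroK (keyT t) r := by
        unfold outerStep
        have h0 : (0 : Int) + 1 = (((([] : List (List Int))).length + 1 : Nat) : Int) := by simp
        have h1 : (((t :: r).length : Nat) : Int)
            = (((([] : List (List Int))).length + 1 + r.length : Nat) : Int) := by
          simp only [List.length_cons, List.length_nil]; push_cast; omega
        rw [h0, h1]
        simpa using L_inner r [] t
      rw [hout]
      have hrange : PySem.List.pyRange (0 + 1) (((t :: r).length : Nat) : Int) 1
          = (List.range r.length).map (fun i => ((i + 1 : Nat) : Int)) := by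
        rw [PySem.List.pyRange_one]
        have : ((((t :: r).length : Nat) : Int) - (0 + 1)).toNat = r.length := by
          simp only [List.length_cons]; push_cast; omega
        rw [this]
        apply List.map_congr_left
        intro i _
        push_cast; ring
      rw [hrange, List.foldl_map, L_outerFold]
      have hback : (List.range r.length).foldl (fun m i => outerStep m ((i : Nat) : Int)) (zeroK (keyT t) r)
          = stage1 (zeroK (keyT t) r) := by
        unfold stage1
        rw [PySem.List.pyRange_one]
        have : (((zeroK (keyT t) r).length : Int) - 0).toNat = r.length := by
          simp [length_zeroK]
        rw [this, List.foldl_map]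
        simp only [zero_add]
      have hn : r.length < n := by simp only [List.length_cons] at hm; omega
      rw [hback, ih r.length hn _ (length_zeroK _ _)]
      conv_rhs => rw [comb]


-- A's stage 2, as filter + map
def gFun (m : List (List Int)) : List (List Int) :=
  (m.filter (fun u => coefT u != 0)).map (fun u => [coefT u, keyT u])

theorem gFun_cons (a : List Int) (l : List (List Int)) :
    gFun (a :: l) = (if coefT a != 0 then [[coefT a, keyT a]] else []) ++ gFun l := by
  by_cases h : coefT a = 0 <;> simp [gFun, h]

theorem coefT_set0 (t : List Int) (v : Int) (h : t ≠ []) : coefT (t.set 0 v) = v := by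
  cases t with
  | nil => exact absurd rfl h
  | cons a l => simp [coefT]

theorem zeroK_cons (x : Int) (u : List Int) (r : List (List Int)) :
    zeroK x (u :: r) = (if keyT u == x then u.set 0 0 else u) :: zeroK x r := by
  simp [zeroK]

theorem remK_cons (x : Int) (u : List Int) (r : List (List Int)) :
    remK x (u :: r) = if keyT u == x then remK x r else u :: remK x r := by
  by_cases h : keyT u = x <;> simp [remK, h]

theorem sumK_zeroK_self (x : Int) (r : List (List Int)) : sumK x (zeroK x r) = 0 := by
  induction r with
  | nil => rfl
  | cons u tl ih =>
    rw [zeroK_cons]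
    by_cases h : keyT u = x
    · rw [if_pos (by simp [h]), sumK_cons, if_pos (by simp [keyT_set0, h]),
        coefT_set0_zero, ih]
      simp
    · rw [if_neg (by simp [h]), sumK_cons, if_neg (by simp [h])]
      exact ih


theorem sumK_zeroK_ne (y x : Int) (r : List (List Int)) (h : y ≠ x) :
    sumK y (zeroK x r) = sumK y r := by
  induction r with
  | nil => rfl
  | cons u tl ih =>
    rw [zeroK_cons]
    by_cases hu : keyT u = x
    · rw [if_pos (by simp [hu]), sumK_cons, if_neg (by simp [keyT_set0, hu]; omega),
        sumK_cons, if_neg (by simp [hu]; omega)]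
      exact ih
    · rw [if_neg (by simp [hu]), sumK_cons, sumK_cons, ih]

theorem sumK_remK_ne (y x : Int) (r : List (List Int)) (h : y ≠ x) :
    sumK y (remK x r) = sumK y r := by
  induction r with
  | nil => rfl
  | cons u tl ih =>
    rw [remK_cons]
    by_cases hu : keyT u = x
    · rw [if_pos (by simp [hu]), ih, sumK_cons, if_neg (by simp [hu]; omega)]
    · rw [if_neg (by simp [hu]), sumK_cons, sumK_cons, ih]

theorem remK_zeroK (x : Int) (r : List (List Int)) : remK x (zeroK x r) = remK x r := by
  induction r with
  | nil => rfl
  | cons u tl ih =>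
    rw [zeroK_cons]
    by_cases hu : keyT u = x
    · rw [if_pos (by simp [hu]), remK_cons, remK_cons, if_pos (by simp [keyT_set0, hu]),
        if_pos (by simp [hu]), ih]
    · rw [if_neg (by simp [hu]), remK_cons, remK_cons, if_neg (by simp [hu]),
        if_neg (by simp [hu]), ih]

theorem remK_comm (x y : Int) (r : List (List Int)) :
    remK x (remK y r) = remK y (remK x r) := by
  simp [remK, List.filter_filter, Bool.and_comm]

theorem remK_zeroK_comm (x y : Int) (r : List (List Int)) :
    remK y (zeroK x r) = zeroK x (remK y r) := by
  induction r with
  | nil => rfl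
  | cons u tl ih =>
    rw [zeroK_cons]
    by_cases hx : keyT u = x
    · rw [if_pos (by simp [hx]), remK_cons, remK_cons]
      by_cases hy : keyT u = y
      · rw [if_pos (by simp [keyT_set0, hy]), if_pos (by simp [hy]), ih]
      · rw [if_neg (by simp [keyT_set0, hy]), if_neg (by simp [hy]),
          zeroK_cons, if_pos (by simp [hx]), ih]
    · rw [if_neg (by simp [hx]), remK_cons, remK_cons]
      by_cases hy : keyT u = y
      · rw [if_pos (by simp [hy]), if_pos (by simp [hy]), ih]
      · rw [if_neg (by simp [hy]), if_neg (by simp [hy]),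
          zeroK_cons, if_neg (by simp [hx]), ih]

theorem length_remK_le (x : Int) (r : List (List Int)) : (remK x r).length ≤ r.length :=
  List.length_filter_le _ _

theorem L_zero (n : Nat) : ∀ (r : List (List Int)) (x : Int), r.length ≤ n →
    resF (zeroK x r) = resF (remK x r) := by
  induction n with
  | zero =>
    intro r x hr
    match r with
    | [] => rfl
  | succ n ih =>
    intro r x hr
    match r with
    | [] => rfl
    | u :: tl =>
      rw [zeroK_cons, remK_cons]
      by_cases hu : keyT u = x
      · rw [if_pos (by simp [hu]), if_pos (by simp [hu])]
        rw [resF]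
        rw [if_neg (by simp [keyT_set0, coefT_set0_zero, hu, sumK_zeroK_self])]
        rw [keyT_set0, hu, remK_zeroK]
        simp
      · rw [if_neg (by simp [hu]), if_neg (by simp [hu])]
        rw [resF, resF]
        rw [sumK_zeroK_ne _ _ _ hu, sumK_remK_ne _ _ _ hu]
        congr 1
        rw [remK_zeroK_comm, remK_comm]
        rw [ih (remK (keyT u) tl) x
          (le_trans (length_remK_le _ _) (by simpa using Nat.le_of_succ_le_succ hr))]


theorem zeroK_ne_nil (x : Int) (r : List (List Int)) (h : ∀ u ∈ r, u ≠ []) :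
    ∀ u ∈ zeroK x r, u ≠ [] := by
  intro u hu
  simp only [zeroK, List.mem_map] at hu
  obtain ⟨v, hv, he⟩ := hu
  intro hnil
  apply h v hv
  subst he
  split at hnil
  · simpa using congrArg List.length hnil
  · exact hnil

theorem L_A2 (n : Nat) : ∀ mult : List (List Int), mult.length ≤ n → (∀ u ∈ mult, u ≠ []) →
    gFun (comb mult) = resF mult := by
  induction n with
  | zero =>
    intro mult h _
    have : mult = [] := List.eq_nil_of_length_eq_zero (Nat.le_zero.mp h)
    subst this; simp [comb, resF, gFun]
  | succ n ih =>
    intro mult h hne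
    cases mult with
    | nil => simp [comb, resF, gFun]
    | cons t r =>
      rw [comb, gFun_cons]
      have ht : t ≠ [] := hne t (by simp)
      rw [coefT_set0 _ _ ht, keyT_set0]
      rw [ih (zeroK (keyT t) r)
        (by simpa [length_zeroK] using Nat.le_of_succ_le_succ h)
        (zeroK_ne_nil _ _ (fun u hu => hne u (by simp [hu])))]
      rw [L_zero r.length r (keyT t) (le_refl _)]
      conv_rhs => rw [resF]
      by_cases hs : coefT t + sumK (keyT t) r = 0 <;> simp [hs]


-- B's grouping dict
def dictB (mult : List (List Int)) : PySem.Dict Int Int :=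
  mult.foldl (fun d term => d.insert (keyT term) (d.getD (keyT term) 0 + coefT term))
    PySem.Dict.empty

theorem getD_dictB_aux (l : List (List Int)) (d : PySem.Dict Int Int) (k : Int) :
    (l.foldl (fun d term => d.insert (keyT term) (d.getD (keyT term) 0 + coefT term)) d).getD k 0
      = d.getD k 0 + sumK k l := by
  induction l generalizing d with
  | nil => simp [sumK_nil]
  | cons u tl ih =>
    rw [List.foldl_cons, ih, PySem.Dict.getD_insert, sumK_cons]
    by_cases hk : k = keyT u
    · rw [if_pos hk, if_pos (by simp [hk]), hk]; ring
    · rw [if_neg hk, if_neg (by simp; omega)]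

theorem getD_dictB (mult : List (List Int)) (k : Int) :
    (dictB mult).getD k 0 = sumK k mult := by
  rw [dictB, getD_dictB_aux, PySem.Dict.getD_empty, zero_add]

theorem keys_dictB (mult : List (List Int)) :
    (dictB mult).keys = PySem.Set.ofList (mult.map keyT) := by
  rw [dictB, PySem.Dict.keys_foldl_insert_key, PySem.Dict.keys_empty]
  rfl

theorem nodup_keys_dictB (mult : List (List Int)) : (dictB mult).keys.Nodup := by
  rw [keys_dictB]
  exact PySem.Set.nodup_ofList _

theorem items_eq_keys_map (d : PySem.Dict Int Int) (h : d.keys.Nodup) :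
    d.items = d.keys.map (fun k => (k, d.getD k 0)) := by
  have hm : ∀ p ∈ d.items, (p.1, d.getD p.1 0) = p := by
    intro p hp
    have := PySem.Dict.getD_of_mem_items (d := d) (k := p.1) (v := p.2) (d0 := 0) (by simpa using hp) h
    rw [this]
  simp only [PySem.Dict.keys, List.map_map]
  calc d.items = d.items.map id := by simp
    _ = d.items.map (fun p => (p.1, d.getD p.1 0)) := (List.map_congr_left (fun p hp => (hm p hp).symm))
    _ = d.items.map ((fun k => (k, d.getD k 0)) ∘ fun p => p.1) := rfl

theorem ded_aux (xs : List Int) : ∀ s : List Int,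
    xs.foldl PySem.Set.add s = s ++ ded (xs.filter (fun y => !(PySem.Set.contains s y))) := by
  induction xs with
  | nil => intro s; simp [ded]
  | cons x tl ih =>
    intro s
    rw [List.foldl_cons, ih]
    by_cases hc : PySem.Set.contains s x
    · have hm : x ∈ s := by simpa [PySem.Set.contains] using hc
      rw [show PySem.Set.add s x = s by simp [PySem.Set.add, hm]]
      rw [List.filter_cons, if_neg (by simp [hm])]
    · have hm : x ∉ s := by simpa [PySem.Set.contains] using hc
      rw [show PySem.Set.add s x = s ++ [x] by simp [PySem.Set.add, hm]]
      rw [List.filter_cons, if_pos (by simp [hm])]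
      rw [ded]
      have : (tl.filter (fun y => !(PySem.Set.contains (s ++ [x]) y)))
          = (tl.filter (fun y => !(PySem.Set.contains s y))).filter (fun y => y != x) := by
        rw [List.filter_filter]
        apply List.filter_congr
        intro y _
        by_cases hy : y = x
        · simp [PySem.Set.contains, hy]
        · simp [PySem.Set.contains, hy]
      rw [this]
      simp

theorem ded_ofList (xs : List Int) : PySem.Set.ofList xs = ded xs := by
  rw [PySem.Set.ofList_eq_foldl, ded_aux]
  simp [PySem.Set.contains]


theorem mem_ded (n : Nat) : ∀ xs : List Int, xs.length ≤ n → ∀ y ∈ ded xs, y ∈ xs := by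
  induction n with
  | zero =>
    intro xs h y hy
    rw [List.eq_nil_of_length_eq_zero (Nat.le_zero.mp h)] at hy
    simp [ded] at hy
  | succ n ih =>
    intro xs h y hy
    cases xs with
    | nil => simp [ded] at hy
    | cons x tl =>
      rw [ded] at hy
      simp only [List.mem_cons] at hy
      rcases hy with hy | hy
      · simp [hy]
      · right
        exact List.mem_of_mem_filter
          (ih (tl.filter (fun y => y != x))
            (le_trans (List.length_filter_le _ _) (by simpa using Nat.le_of_succ_le_succ h)) y hy)

theorem flatMap_congr_mem {α β : Type} (l : List α) (f g : α → List β)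
    (h : ∀ x ∈ l, f x = g x) : l.flatMap f = l.flatMap g := by
  induction l with
  | nil => rfl
  | cons x tl ih =>
    rw [List.flatMap_cons, List.flatMap_cons, h x (by simp), ih (fun x hx => h x (by simp [hx]))]

theorem map_keyT_remK (x : Int) (r : List (List Int)) :
    (remK x r).map keyT = (r.map keyT).filter (fun y => y != x) := by
  induction r with
  | nil => rfl
  | cons u tl ih =>
    rw [remK_cons, List.map_cons, List.filter_cons]
    by_cases hu : keyT u = x
    · rw [if_pos (by simp [hu]), if_neg (by simp [hu]), ih]
    · rw [if_neg (by simp [hu]), if_pos (by simp [hu]), List.map_cons, ih]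

theorem L_B2 (n : Nat) : ∀ mult : List (List Int), mult.length ≤ n →
    (ded (mult.map keyT)).flatMap
      (fun k => if sumK k mult ≠ 0 then [[sumK k mult, k]] else []) = resF mult := by
  induction n with
  | zero =>
    intro mult h
    rw [List.eq_nil_of_length_eq_zero (Nat.le_zero.mp h)]
    simp [ded, resF]
  | succ n ih =>
    intro mult h
    cases mult with
    | nil => simp [ded, resF]
    | cons t r =>
      rw [List.map_cons, ded, List.flatMap_cons, ← map_keyT_remK]
      have hs : sumK (keyT t) (t :: r) = coefT t + sumK (keyT t) r := by
        rw [sumK_cons, if_pos (by simp)]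
      have htail : (ded ((remK (keyT t) r).map keyT)).flatMap
            (fun k => if sumK k (t :: r) ≠ 0 then [[sumK k (t :: r), k]] else [])
          = resF (remK (keyT t) r) := by
        rw [flatMap_congr_mem _ _
          (fun k => if sumK k (remK (keyT t) r) ≠ 0 then [[sumK k (remK (keyT t) r), k]] else []) ?_]
        · exact ih (remK (keyT t) r)
            (le_trans (length_remK_le _ _) (by simpa using Nat.le_of_succ_le_succ h))
        · intro k hk
          have hkx : k ≠ keyT t := by
            have := mem_ded ((remK (keyT t) r).map keyT).length _ (le_refl _) k hk
            rw [map_keyT_remK] at this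
            have := List.of_mem_filter this
            simpa using this
          rw [show sumK k (t :: r) = sumK k (remK (keyT t) r) by
            rw [sumK_cons, if_neg (by simp; omega), sumK_remK_ne _ _ _ hkx]]
      rw [hs, htail]
      conv_rhs => rw [resF]

theorem foldl_stage2 (m : List (List Int)) (acc : List (List Int)) :
    m.foldl (fun multr u => if PySem.List.pyGetD u 0 0 ≠ 0 then
        multr ++ [[PySem.List.pyGetD u 0 0, PySem.List.pyGetD u 1 0]] else multr) acc
      = acc ++ gFun m := by
  induction m generalizing acc with
  | nil => simp [gFun]
  | cons u tl ih =>
    rw [List.foldl_cons, ih]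
    have h0 : PySem.List.pyGetD u 0 0 = coefT u := by simp [PySem.List.pyGetD_zero, coefT]
    have h1 : PySem.List.pyGetD u 1 0 = keyT u := by simp [PySem.List.pyGetD_ofNat', keyT]
    rw [h0, h1, gFun_cons]
    by_cases hc : coefT u = 0 <;> simp [hc]

theorem A_normal (mult : List (List Int)) :
    analisesoma mult
      = PySem.List.sorted (gFun (stage1 mult)) (fun val => PySem.List.pyGetD val 1 0) false := by
  simp only [analisesoma]
  rw [PySem.List.foldl_pyRange_zero_pyGetD'
    ((PySem.List.pyRange 0 (mult.length : Int) 1).foldl outerStep mult) ([] : List Int)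
    (fun multr u => if PySem.List.pyGetD u 0 0 ≠ 0 then
        multr ++ [[PySem.List.pyGetD u 0 0, PySem.List.pyGetD u 1 0]] else multr) []]
  rw [foldl_stage2]
  rfl

theorem items_dictB (mult : List (List Int)) :
    (dictB mult).items = (ded (mult.map keyT)).map (fun k => (k, sumK k mult)) := by
  rw [items_eq_keys_map _ (nodup_keys_dictB mult), keys_dictB, ded_ofList]
  apply List.map_congr_left
  intro k _
  rw [getD_dictB]

theorem filtermap_flatMap (L : List Int) (g : Int → Int) :
    (((L.map (fun k => (k, g k))).filter (fun p => p.2 != 0)).map (fun p => [p.2, p.1]))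
      = L.flatMap (fun k => if g k ≠ 0 then [[g k, k]] else []) := by
  induction L with
  | nil => rfl
  | cons x tl ih =>
    rw [List.map_cons, List.filter_cons, List.flatMap_cons, ← ih]
    by_cases hg : g x = 0
    · rw [if_neg (by simp [hg]), if_neg (by simp [hg])]
      simp
    · rw [if_pos (by simp [hg]), if_pos (by simp [hg]), List.map_cons]
      simp

theorem B_normal (mult : List (List Int)) :
    analisesoma_alt mult
      = PySem.List.sorted
          ((ded (mult.map keyT)).flatMap
            (fun k => if sumK k mult ≠ 0 then [[sumK k mult, k]] else []))
          (fun t => PySem.List.pyGetD t 1 0) false := by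
  simp only [analisesoma_alt]
  have hfun : (fun (totals : PySem.Dict Int Int) (term : List Int) =>
        totals.insert (PySem.List.pyGetD term 1 0)
          (totals.getD (PySem.List.pyGetD term 1 0) 0 + PySem.List.pyGetD term 0 0))
      = (fun (d : PySem.Dict Int Int) (term : List Int) =>
        d.insert (keyT term) (d.getD (keyT term) 0 + coefT term)) := by
    funext d term
    simp [PySem.List.pyGetD_ofNat', keyT, coefT]
  rw [hfun]
  rw [show (mult.foldl (fun (d : PySem.Dict Int Int) (term : List Int) =>
      d.insert (keyT term) (d.getD (keyT term) 0 + coefT term)) PySem.Dict.empty) = dictB mult from rfl]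
  rw [items_dictB, filtermap_flatMap]


-- ===== VERDICT (by name: the statement is the Claim_ definition above) =====
theorem analisesoma_spec : Claim_equal_analisesoma := by
  intro mult _ hpre
  unfold Spec_analisesoma
  rw [A_normal, B_normal]
  have hne : ∀ u ∈ mult, u ≠ [] := by
    intro u hu hnil
    have := hpre u hu
    rw [hnil] at this
    simp at this
  have : gFun (stage1 mult) = resF mult := by
    rw [L_comb mult.length mult rfl]
    exact L_A2 mult.length mult (le_refl _) hne
  rw [this, L_B2 mult.length mult (le_refl _)]
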